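-- pv_equiv track=rewrite | github.com/IcySnowy16/VForObvious | ProgressTrackerTeleBotz/progress_tracker/bot.py | _parse_percent_list
-- ===== SOURCE A (Python) =====
-- from typing import Any, Dict, List, Tuple
--
-- def _parse_percent_list(raw: str) -> List[int]:
--     parts = [p for p in raw.replace(",", " ").split() if p]
--     values: List[int] = []
--     for part in parts:
--         try:
--             value = int(part)
--         except ValueError:
--             continue
--         values.append(max(0, min(100, value)))
--     return sorted(set(values))
-- ===== SOURCE B (Python) =====
-- def _insert_unique(res, v):
--     if not res:
--         return [v]
--     if res[0] < v:
--         return [res[0]] + _insert_unique(res[1:], v)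
--     if res[0] == v:
--         return res
--     return [v] + res
--
--
-- def _parse_percent_list(raw):
--     result = []
--     token = ""
--     for c in raw + " ":  # trailing sentinel delimiter flushes the last token
--         if c == "," or c.isspace():
--             try:
--                 value = int(token)
--             except ValueError:
--                 token = ""
--                 continue
--             token = ""
--             clamped = 0 if value < 0 else (100 if value > 100 else value)
--             result = _insert_unique(result, clamped)
--         else:
--             token += c
--     return result
-- ===== Notes on version B (the rewrite author's own statement) =====
-- stated objective: alternative
-- what changed: Replaces the staged pipeline (replace commas, split, append all values, sorted(set(...))) with a single character-level scan that lexes tokens in one pass and maintains the sorted deduplicated result online via ordered insertion, so no replace/split/set/sorted is used.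
import Mathlib
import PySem

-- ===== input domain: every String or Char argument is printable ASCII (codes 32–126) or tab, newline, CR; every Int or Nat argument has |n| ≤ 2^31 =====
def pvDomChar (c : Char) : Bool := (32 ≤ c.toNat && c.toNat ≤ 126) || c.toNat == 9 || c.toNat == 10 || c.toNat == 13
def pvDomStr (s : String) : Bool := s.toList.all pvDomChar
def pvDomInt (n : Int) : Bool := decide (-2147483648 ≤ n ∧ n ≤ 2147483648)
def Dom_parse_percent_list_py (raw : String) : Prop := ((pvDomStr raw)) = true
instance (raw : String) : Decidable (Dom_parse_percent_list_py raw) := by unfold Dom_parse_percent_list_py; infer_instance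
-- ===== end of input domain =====

-- B replaces A's staged pipeline (replace commas, split, collect, sorted(set(...))) by a single
-- character-level scan with online ordered insertion; same cost class, no sort/set.

-- ===== PORT A =====
def parse_percent_list_py (raw : String) : List Int :=
  let parts := (PySem.Str.split₀ (PySem.Str.replace raw "," " ")).filter (fun p => decide (p ≠ ""))
  let values := parts.foldl (fun acc part =>
    match PySem.Int.ofStr? part with
    | none => acc
    | some value => acc ++ [max 0 (min 100 value)]) ([] : List Int)
  PySem.List.sorted (PySem.Set.ofList values) (fun x => x)

-- ===== PORT B =====
-- _insert_unique: recursive ordered insertion without duplicates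
def pvInsertUnique (res : List Int) (v : Int) : List Int :=
  match res with
  | [] => [v]
  | x :: xs => if x < v then x :: pvInsertUnique xs v
               else if x = v then x :: xs
               else v :: x :: xs

-- one step of the character scan: state = (result so far, current token)
def pvScanStep (st : List Int × List Char) (c : Char) : List Int × List Char :=
  if c = ',' || PySem.Chars.isspace c then
    match PySem.Int.ofChars? st.2 with
    | none => (st.1, [])
    | some value =>
        (pvInsertUnique st.1 (if value < 0 then 0 else if 100 < value then 100 else value), [])
  else (st.1, st.2 ++ [c])

def parse_percent_list_py_alt (raw : String) : List Int :=
  ((raw.toList ++ [' ']).foldl pvScanStep (([] : List Int), ([] : List Char))).1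

-- ===== PRECONDITION & SPEC =====
def Spec_parse_percent_list_py (raw : String) (out : List Int) : Prop := out = parse_percent_list_py_alt raw
instance (raw : String) (out : List Int) : Decidable (Spec_parse_percent_list_py raw out) := by unfold Spec_parse_percent_list_py; infer_instance

-- ===== CLAIM (what is proved, stated in full; the proofs are below) =====
def Claim_equal_parse_percent_list_py : Prop := ∀ (raw : String), Dom_parse_percent_list_py raw → Spec_parse_percent_list_py raw (parse_percent_list_py raw)

-- ===== LEMMAS AND PROOFS =====

-- comma → space, character-wise
def pvMapc (cs : List Char) : List Char := cs.map (fun c => if c = ',' then ' ' else c)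

-- clamped parsed values of a list of string tokens (A's encounter order)
def pvVals : List String → List Int
  | [] => []
  | p :: ps =>
    match PySem.Int.ofStr? p with
    | none => pvVals ps
    | some v => max 0 (min 100 v) :: pvVals ps

-- same, over char-list tokens
def pvValsC : List (List Char) → List Int
  | [] => []
  | t :: ts =>
    match PySem.Int.ofChars? t with
    | none => pvValsC ts
    | some v => max 0 (min 100 v) :: pvValsC ts

theorem pvVals_filter (ps : List String) :
    pvVals (ps.filter (fun p => decide (p ≠ ""))) = pvVals ps := by
  induction ps with
  | nil => rfl
  | cons p ps ih =>
    by_cases hp : p = ""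
    · subst hp
      simpa [pvVals, PySem.Int.ofStr?] using ih
    · simp only [decide_not] at ih
      simp only [List.filter_cons, decide_not, hp, decide_false, Bool.not_false, if_true]
      unfold pvVals
      cases PySem.Int.ofStr? p <;> simp [ih]

theorem pvVals_map_ofList (ts : List (List Char)) :
    pvVals (ts.map String.ofList) = pvValsC ts := by
  induction ts with
  | nil => rfl
  | cons t ts ih =>
    rw [List.map_cons]
    cases h : PySem.Int.ofChars? t with
    | none =>
      simp [pvVals, pvValsC, PySem.Int.ofStr?, h, ih]
    | some v =>
      simp [pvVals, pvValsC, PySem.Int.ofStr?, h, ih]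

theorem pvValsC_append (ts us : List (List Char)) :
    pvValsC (ts ++ us) = pvValsC ts ++ pvValsC us := by
  induction ts with
  | nil => rfl
  | cons t ts ih =>
    rw [List.cons_append]
    cases h : PySem.Int.ofChars? t with
    | none => simp [pvValsC, h, ih]
    | some v => simp [pvValsC, h, ih]

theorem foldA_eq (ps : List String) (acc : List Int) :
    ps.foldl (fun acc part =>
      match PySem.Int.ofStr? part with
      | none => acc
      | some value => acc ++ [max 0 (min 100 value)]) acc = acc ++ pvVals ps := by
  induction ps generalizing acc with
  | nil => simp [pvVals]
  | cons p ps ih =>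
    simp only [List.foldl_cons]
    cases h : PySem.Int.ofStr? p with
    | none => simp [pvVals, h, ih]
    | some v => simp [pvVals, h, ih]

-- replace.go with old = "," and new = " " maps commas to spaces
theorem pv_replace_go (l : List Char) : ∀ (fuel : Nat) (acc : List Char), l.length ≤ fuel →
    PySem.Chars.replace.go [','] [' '] fuel l acc = acc.reverse ++ pvMapc l := by
  induction l with
  | nil =>
    intro fuel acc _
    cases fuel with
    | zero => rw [PySem.Chars.replace.go]; simp [pvMapc]
    | succ n =>
      rw [PySem.Chars.replace.go]
      · simp [pvMapc]
      · omega
  | cons c t ih =>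
    intro fuel acc hle
    cases fuel with
    | zero => simp at hle
    | succ fuel =>
      rw [PySem.Chars.replace.go]
      rw [show [','].isPrefixOf (c :: t) = (',' == c) from by simp [List.isPrefixOf]]
      by_cases hc : c = ','
      · subst hc
        rw [if_pos (by simp)]
        rw [show List.drop [','].length (',' :: t) = t from rfl,
          show ([' '].reverse ++ acc) = ' ' :: acc from by simp]
        rw [ih fuel (' ' :: acc) (by simpa using hle)]
        simp [pvMapc]
      · rw [if_neg (by simp [Ne.symm hc])]
        rw [ih fuel (c :: acc) (by simpa using hle)]
        simp [pvMapc, hc]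

theorem pv_replace_comma (cs : List Char) :
    PySem.Chars.replace cs [','] [' '] = pvMapc cs := by
  rw [PySem.Chars.replace]
  simpa using pv_replace_go cs cs.length [] le_rfl

-- split₀.go accumulator lemma
theorem pv_split_go_acc (cs : List Char) : ∀ (cur : List Char) (acc : List (List Char)),
    PySem.Chars.split₀.go cs cur acc = acc.reverse ++ PySem.Chars.split₀.go cs cur [] := by
  induction cs with
  | nil =>
    intro cur acc
    rw [PySem.Chars.split₀.go, PySem.Chars.split₀.go]
    by_cases h : cur.isEmpty <;> simp [h]
  | cons c cs ih =>
    intro cur acc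
    rw [PySem.Chars.split₀.go]
    conv_rhs => rw [PySem.Chars.split₀.go]
    by_cases hs : PySem.Chars.isspace c
    · by_cases h : cur.isEmpty
      · simp only [hs, h, if_pos]
        exact ih [] acc
      · simp only [hs, h, if_pos, Bool.false_eq_true, if_false]
        rw [ih [] (cur.reverse :: acc), ih [] [cur.reverse]]
        simp
    · simp only [hs, Bool.false_eq_true, if_false]
      exact ih (c :: cur) acc

-- the single-pass scan computes the ordered insertion of the clamped values of the split tokens
theorem pv_scan_eq (cs : List Char) : ∀ (res : List Int) (tok : List Char),
    ((cs ++ [' ']).foldl pvScanStep (res, tok)).1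
      = (pvValsC (PySem.Chars.split₀.go (pvMapc cs) tok.reverse [])).foldl pvInsertUnique res := by
  induction cs with
  | nil =>
    intro res tok
    simp only [List.nil_append, List.foldl_cons, List.foldl_nil, pvMapc, List.map_nil]
    rw [PySem.Chars.split₀.go]
    unfold pvScanStep
    rw [if_pos (by decide)]
    by_cases ht : tok = []
    · subst ht
      simp [pvValsC, show PySem.Int.ofChars? ([] : List Char) = none from rfl]
    · rw [if_neg (by simpa [List.isEmpty_iff] using ht)]
      simp only [List.reverse_reverse, List.reverse_cons, List.reverse_nil, List.nil_append]
      cases h : PySem.Int.ofChars? tok with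
      | none => simp [pvValsC, h]
      | some v =>
        simp only [h, pvValsC, List.foldl_cons, List.foldl_nil]
        rw [show (if v < 0 then (0:Int) else if 100 < v then 100 else v) = max 0 (min 100 v) from by omega]
  | cons c cs ih =>
    intro res tok
    by_cases hd : (c = ',' || PySem.Chars.isspace c) = true
    · have hmap : pvMapc (c :: cs) = (if c = ',' then ' ' else c) :: pvMapc cs := rfl
      have hsp : PySem.Chars.isspace (if c = ',' then ' ' else c) = true := by
        by_cases hc : c = ','
        · rw [if_pos hc]; decide
        · rw [if_neg hc]
          rcases Bool.or_eq_true_iff.mp hd with h | h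
          · exact absurd (of_decide_eq_true h) hc
          · exact h
      rw [List.cons_append, List.foldl_cons, hmap, PySem.Chars.split₀.go, if_pos hsp]
      by_cases ht : tok = []
      · subst ht
        rw [if_pos (by decide)]
        rw [show pvScanStep (res, []) c = (res, []) from by
          unfold pvScanStep
          rw [if_pos hd, show PySem.Int.ofChars? ([] : List Char) = none from rfl]]
        exact ih res []
      · rw [if_neg (by simpa [List.isEmpty_iff] using ht)]
        rw [pv_split_go_acc, List.reverse_reverse, List.reverse_cons, List.reverse_nil,
          List.nil_append, pvValsC_append]
        cases h : PySem.Int.ofChars? tok with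
        | none =>
          rw [show pvScanStep (res, tok) c = (res, []) from by
            unfold pvScanStep; rw [if_pos hd, h]]
          rw [show pvValsC [tok] = [] from by simp [pvValsC, h]]
          rw [List.nil_append]
          exact ih res []
        | some v =>
          rw [show pvScanStep (res, tok) c
              = (pvInsertUnique res (if v < 0 then 0 else if 100 < v then 100 else v), []) from by
            unfold pvScanStep; rw [if_pos hd, h]]
          rw [show pvValsC [tok] = [max 0 (min 100 v)] from by simp [pvValsC, h]]
          conv_rhs => rw [List.singleton_append, List.foldl_cons]
          rw [show (if v < 0 then (0:Int) else if 100 < v then 100 else v) = max 0 (min 100 v) from by omega]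
          exact ih _ []
    · have hc : ¬ c = ',' := by
        intro h; subst h; simp at hd
      have hmap : pvMapc (c :: cs) = c :: pvMapc cs := by simp [pvMapc, hc]
      have hsp : PySem.Chars.isspace c = false :=
        (show ¬ c = ',' ∧ PySem.Chars.isspace c = false by simpa using hd).2
      rw [List.cons_append, List.foldl_cons, hmap, PySem.Chars.split₀.go, hsp]
      simp only [Bool.false_eq_true, if_false]
      have hstep : pvScanStep (res, tok) c = (res, tok ++ [c]) := by
        unfold pvScanStep; rw [if_neg (by simp [hd])]
      rw [hstep]
      have := ih res (tok ++ [c])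
      simpa [List.reverse_append] using this

-- ordered-insertion properties
theorem mem_pvInsertUnique (res : List Int) (v x : Int) :
    x ∈ pvInsertUnique res v ↔ x = v ∨ x ∈ res := by
  induction res with
  | nil => simp [pvInsertUnique]
  | cons y ys ih =>
    unfold pvInsertUnique
    split_ifs with h1 h2
    · simp only [List.mem_cons, ih]
      tauto
    · subst h2
      simp only [List.mem_cons]
      tauto
    · simp only [List.mem_cons]

theorem pairwise_pvInsertUnique (res : List Int) (v : Int)
    (h : res.Pairwise (fun a b => a < b)) :
    (pvInsertUnique res v).Pairwise (fun a b => a < b) := by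
  induction res with
  | nil => simp [pvInsertUnique]
  | cons y ys ih =>
    rcases List.pairwise_cons.mp h with ⟨hy, hys⟩
    unfold pvInsertUnique
    split_ifs with h1 h2
    · refine List.pairwise_cons.mpr ⟨?_, ih hys⟩
      intro z hz
      rcases (mem_pvInsertUnique ys v z).mp hz with rfl | hz'
      · exact h1
      · exact hy z hz'
    · exact h
    · refine List.pairwise_cons.mpr ⟨?_, h⟩
      intro z hz
      have hv : v < y := by omega
      rcases List.mem_cons.mp hz with rfl | hz'
      · exact hv
      · exact lt_trans hv (hy z hz')

theorem foldl_pvInsertUnique_pairwise (vs : List Int) : ∀ (res : List Int),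
    res.Pairwise (fun a b => a < b) →
    (vs.foldl pvInsertUnique res).Pairwise (fun a b => a < b) := by
  induction vs with
  | nil => intro res h; simpa using h
  | cons v vs ih =>
    intro res h
    exact ih _ (pairwise_pvInsertUnique res v h)

theorem mem_foldl_pvInsertUnique (vs : List Int) : ∀ (res : List Int) (x : Int),
    x ∈ vs.foldl pvInsertUnique res ↔ x ∈ res ∨ x ∈ vs := by
  induction vs with
  | nil => intro res x; simp
  | cons v vs ih =>
    intro res x
    simp only [List.foldl_cons, ih, mem_pvInsertUnique, List.mem_cons]
    tauto

-- ===== VERDICT (by name: the statement is the Claim_ definition above) =====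
theorem parse_percent_list_py_spec : Claim_equal_parse_percent_list_py := by
  intro raw _
  unfold Spec_parse_percent_list_py parse_percent_list_py parse_percent_list_py_alt
  simp only
  rw [foldA_eq, List.nil_append, pvVals_filter]
  rw [show PySem.Str.split₀ (PySem.Str.replace raw "," " ")
      = (PySem.Chars.split₀ (PySem.Chars.replace raw.toList [','] [' '])).map String.ofList from by
    simp [PySem.Str.split₀, PySem.Str.replace]]
  rw [pvVals_map_ofList, pv_replace_comma]
  rw [show PySem.Chars.split₀ (pvMapc raw.toList)
      = PySem.Chars.split₀.go (pvMapc raw.toList) [] [] from rfl]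
  rw [pv_scan_eq raw.toList [] []]
  simp only [List.reverse_nil]
  have hpair : ((pvValsC (PySem.Chars.split₀.go (pvMapc raw.toList) [] [])).foldl
      pvInsertUnique []).Pairwise (fun a b => a < b) :=
    foldl_pvInsertUnique_pairwise _ [] (by simp)
  apply PySem.List.sorted_eq_of_perm_of_pairwise_lt _ _ _ _ hpair
  rw [List.perm_ext_iff_of_nodup (hpair.imp (fun h => ne_of_lt h)) (PySem.Set.nodup_ofList _)]
  intro x
  rw [mem_foldl_pvInsertUnique, PySem.Set.mem_ofList]
  simp
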